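-- pv_equiv track=rewrite | github.com/denibuks/Denis.Bukholdin-Lucas.Aristondo---SegundoParcial | PARCIAL 2/funciones_recursivas.py | validar_nombre_jugador_recursivo
-- ===== SOURCE A (Python) =====
-- def validar_nombre_jugador_recursivo(nombre, indice=0):
--     # Caso base: si el índice llegó al final del nombre, todos los caracteres son válidos
--     es_valido = True
--     if indice < len(nombre):
--         # Obtiene el carácter actual en la posición 'indice'
--         char = nombre[indice]
--         # Convierte el carácter a su valor numérico en ASCII
--         codigo = ord(char)
--
--         # Verifica si el carácter es una letra mayúscula (A-Z),
--         # una letra minúscula (a-z), o un espacio ( )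
--         if not ((65 <= codigo <= 90) or (97 <= codigo <= 122) or codigo == 32):
--             es_valido = False  # Si no lo es, el nombre no es válido
--         else:
--             # Si el carácter es valido, continua validando el siguiente carácter recursivamente
--             es_valido = validar_nombre_jugador_recursivo(nombre, indice + 1)
--
--     return es_valido
-- ===== SOURCE B (Python) =====
-- def validar_nombre_jugador_recursivo(nombre, indice=0):
--     # Iterative: scan indices from 'indice' to the end, fail on the first invalid char.
--     for i in range(indice, len(nombre)):
--         codigo = ord(nombre[i])
--         if not ((65 <= codigo <= 90) or (97 <= codigo <= 122) or codigo == 32):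
--             return False
--     return True
-- ===== Notes on version B (the rewrite author's own statement) =====
-- stated objective: simpler
-- what changed: Replaces A's tail recursion with an iterative for-loop over range(indice, len(nombre)) that returns False at the first invalid character, dropping the es_valido accumulator.
import Mathlib
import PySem

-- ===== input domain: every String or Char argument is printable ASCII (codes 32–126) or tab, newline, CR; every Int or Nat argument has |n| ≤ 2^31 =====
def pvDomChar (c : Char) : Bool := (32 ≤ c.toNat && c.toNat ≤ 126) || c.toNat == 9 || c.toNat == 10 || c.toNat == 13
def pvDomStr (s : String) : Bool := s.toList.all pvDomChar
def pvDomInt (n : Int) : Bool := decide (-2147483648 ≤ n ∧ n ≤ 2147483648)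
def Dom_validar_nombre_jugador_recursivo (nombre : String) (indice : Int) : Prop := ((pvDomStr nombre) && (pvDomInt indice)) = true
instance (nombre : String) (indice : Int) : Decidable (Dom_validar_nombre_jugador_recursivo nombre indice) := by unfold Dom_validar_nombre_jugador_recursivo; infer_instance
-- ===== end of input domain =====

-- B replaces A's recursion by a single iterative range-scan with early exit (objective: simpler decomposition; same cost).

-- ===== PORT A =====
-- A's recursion on 'indice'; nombre[indice] is the (possibly negative, wrapping) Python index.
def pvAuxA (chars : List Char) (indice : Int) : Bool :=
  if indice < (chars.length : Int) then
    match PySem.List.pyGet? chars indice with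
    | none => false  -- IndexError in Python (indice < -len); excluded by Pre_
    | some char =>
      let codigo : Int := char.toNat
      if ¬((65 ≤ codigo ∧ codigo ≤ 90) ∨ (97 ≤ codigo ∧ codigo ≤ 122) ∨ codigo = 32) then
        false
      else
        pvAuxA chars (indice + 1)
  else true
termination_by ((chars.length : Int) - indice).toNat
decreasing_by omega

def validar_nombre_jugador_recursivo (nombre : String) (indice : Int) : Bool :=
  pvAuxA nombre.toList indice

-- ===== PORT B =====
def pvValidoB (c : Char) : Bool :=
  (65 ≤ c.toNat && c.toNat ≤ 90) || (97 ≤ c.toNat && c.toNat ≤ 122) || c.toNat == 32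

-- B's for-loop over range(indice, len(nombre)) with early False = List.all over pyRange.
def validar_nombre_jugador_recursivo_alt (nombre : String) (indice : Int) : Bool :=
  (PySem.List.pyRange indice (nombre.toList.length : Int) 1).all (fun i =>
    match PySem.List.pyGet? nombre.toList i with
    | none => false  -- IndexError in Python; excluded by Pre_
    | some c => pvValidoB c)

-- ===== PRECONDITION & SPEC =====
-- Python A raises IndexError exactly when indice < -len(nombre) (first wrapped access is out of range); B raises there too.
def Pre_validar_nombre_jugador_recursivo (nombre : String) (indice : Int) : Prop :=
  -(nombre.toList.length : Int) ≤ indice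
instance (nombre : String) (indice : Int) : Decidable (Pre_validar_nombre_jugador_recursivo nombre indice) := by
  unfold Pre_validar_nombre_jugador_recursivo; infer_instance

def pvWitness_validar_nombre_jugador_recursivo : String × Int := ("Ana B", 0)

def Spec_validar_nombre_jugador_recursivo (nombre : String) (indice : Int) (out : Bool) : Prop := out = validar_nombre_jugador_recursivo_alt nombre indice
instance (nombre : String) (indice : Int) (out : Bool) : Decidable (Spec_validar_nombre_jugador_recursivo nombre indice out) := by unfold Spec_validar_nombre_jugador_recursivo; infer_instance

-- ===== CLAIM (what is proved, stated in full; the proofs are below) =====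
def Claim_equal_validar_nombre_jugador_recursivo : Prop := ∀ (nombre : String) (indice : Int), Dom_validar_nombre_jugador_recursivo nombre indice → Pre_validar_nombre_jugador_recursivo nombre indice → Spec_validar_nombre_jugador_recursivo nombre indice (validar_nombre_jugador_recursivo nombre indice)

-- ===== LEMMAS AND PROOFS =====
lemma pvValidoB_iff (c : Char) :
    pvValidoB c = true ↔
      ((65 ≤ (c.toNat : Int) ∧ (c.toNat : Int) ≤ 90) ∨
       (97 ≤ (c.toNat : Int) ∧ (c.toNat : Int) ≤ 122) ∨ (c.toNat : Int) = 32) := by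
  simp [pvValidoB]
  omega

lemma pvAuxA_eq_all (chars : List Char) (k : Nat) (indice : Int)
    (hk : ((chars.length : Int) - indice).toNat = k) :
    pvAuxA chars indice =
      (PySem.List.pyRange indice (chars.length : Int) 1).all (fun i =>
        match PySem.List.pyGet? chars i with
        | none => false
        | some c => pvValidoB c) := by
  induction k generalizing indice with
  | zero =>
    have h : (chars.length : Int) ≤ indice := by omega
    rw [pvAuxA, PySem.List.pyRange_one_eq_nil h]
    simp [not_lt.mpr h]
  | succ k ih =>
    have h : indice < (chars.length : Int) := by omega
    rw [pvAuxA, PySem.List.pyRange_one_cons h, List.all_cons, if_pos h,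
        ih (indice + 1) (by omega)]
    cases hg : PySem.List.pyGet? chars indice with
    | none => simp
    | some c =>
      simp only []
      by_cases hc : (65 ≤ (c.toNat : Int) ∧ (c.toNat : Int) ≤ 90) ∨
          (97 ≤ (c.toNat : Int) ∧ (c.toNat : Int) ≤ 122) ∨ (c.toNat : Int) = 32
      · rw [if_neg (not_not.mpr hc)]
        have ht : pvValidoB c = true := (pvValidoB_iff c).mpr hc
        simp [ht]
      · rw [if_pos hc]
        have hf : pvValidoB c = false := by
          simpa using mt (pvValidoB_iff c).mp hc
        simp [hf]

-- ===== VERDICT (by name: the statement is the Claim_ definition above) =====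
theorem validar_nombre_jugador_recursivo_spec : Claim_equal_validar_nombre_jugador_recursivo := by
  intro nombre indice _ _
  unfold Spec_validar_nombre_jugador_recursivo validar_nombre_jugador_recursivo
    validar_nombre_jugador_recursivo_alt
  exact pvAuxA_eq_all nombre.toList _ indice rfl
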